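-- pv_equiv track=rewrite | github.com/CREVOFFICIAL/algorithm | junyeong/programmers/68645.py | solution
-- ===== SOURCE A (Python) =====
-- from itertools import chain
--
-- def solution(n):
--     numbers = [[0 for _ in range(n)] for _ in range(n)]
--     max_number = sum(i for i in range(1, n+1))
--     y, x = -1, 0
--     size = n - 1
--
--     directions = {0: (1, 0), 1: (0, 1), 2: (-1, -1)}
--     count = 0
--     current = 0
--
--     for number in range(1, max_number+1):
--         position = directions[current]
--         y += position[0]
--         x += position[1]
--         numbers[y][x] = number
--
--         if count < size:
--             count += 1
--         else:
--             count = 0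
--             size -= 1
--             current = (current + 1) % 3
--
--     answer = [i for i in chain(*numbers) if i != 0]
--     return answer
-- ===== SOURCE B (Python) =====
-- def solution(n):
--     grid = [[0 for _ in range(n)] for _ in range(n)]
--     directions = [(1, 0), (0, 1), (-1, -1)]
--     y, x = -1, 0
--     num = 1
--     for i in range(n):
--         dy, dx = directions[i % 3]
--         for _ in range(n - i):
--             y += dy
--             x += dx
--             grid[y][x] = num
--             num += 1
--     return [v for row in grid for v in row if v != 0]
-- ===== Notes on version B (the rewrite author's own statement) =====
-- stated objective: simpler
-- what changed: Replaces A's single flat loop driven by a count/size/current state machine with nested loops: the outer loop iterates over the spiral segments of explicitly decreasing lengths, picking the direction by segment index mod three, removing the counter state machine entirely.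
import Mathlib
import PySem

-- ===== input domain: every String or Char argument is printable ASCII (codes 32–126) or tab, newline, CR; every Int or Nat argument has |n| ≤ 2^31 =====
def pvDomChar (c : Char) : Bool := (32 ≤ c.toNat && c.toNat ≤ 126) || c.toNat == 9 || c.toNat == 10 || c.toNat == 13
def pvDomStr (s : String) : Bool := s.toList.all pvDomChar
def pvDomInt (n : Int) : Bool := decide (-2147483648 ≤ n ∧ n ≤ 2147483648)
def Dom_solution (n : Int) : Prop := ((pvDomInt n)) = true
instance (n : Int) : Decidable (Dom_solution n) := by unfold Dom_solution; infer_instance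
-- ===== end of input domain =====

-- B replaces A's flat loop with its count/size/current state machine by nested loops over
-- explicit segments of decreasing lengths (objective: simpler).

-- shared helper: numbers[y][x] = v (both Pythons perform exactly this statement);
-- ported with the total pySetD/pyGetD forms — exact here, since the spiral's indices are
-- always in range whenever the loop body runs, so Python never raises.
def pvSet2 (g : List (List Int)) (y x v : Int) : List (List Int) :=
  PySem.List.pySetD g y (PySem.List.pySetD (PySem.List.pyGetD g y []) x v)

-- ===== PORT A =====
def pvDirsA : PySem.Dict Int (Int × Int) :=
  PySem.Dict.ofList [(0, (1, 0)), (1, (0, 1)), (2, (-1, -1))]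

-- one iteration of A's for-loop; state (numbers, y, x, count, size, current)
def pvStepA (st : List (List Int) × Int × Int × Int × Int × Int) (number : Int) :
    List (List Int) × Int × Int × Int × Int × Int :=
  let g := st.1; let y := st.2.1; let x := st.2.2.1
  let count := st.2.2.2.1; let size := st.2.2.2.2.1; let current := st.2.2.2.2.2
  -- directions[current]: exact, current ∈ {0,1,2} so the KeyError branch never fires
  let pos := (PySem.Dict.get? pvDirsA current).getD (0, 0)
  let y := y + pos.1
  let x := x + pos.2
  let g := pvSet2 g y x number
  if count < size then (g, y, x, count + 1, size, current)
  else (g, y, x, 0, size - 1, PySem.Int.mod (current + 1) 3)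

def solution (n : Int) : List Int :=
  let numbers := (PySem.List.pyRange 0 n 1).map
    (fun _ => (PySem.List.pyRange 0 n 1).map (fun _ => (0 : Int)))
  let maxNumber := ((PySem.List.pyRange 1 (n + 1) 1).map (fun i => i)).sum
  let st := (PySem.List.pyRange 1 (maxNumber + 1) 1).foldl pvStepA (numbers, -1, 0, 0, n - 1, 0)
  st.1.flatten.filter (fun i => i != 0)

-- ===== PORT B =====
def pvDirsB : List (Int × Int) := [(1, 0), (0, 1), (-1, -1)]

-- body of B's inner loop (the loop variable is ignored); state (grid, y, x, num)
def pvInnerB (d : Int × Int) (st : List (List Int) × Int × Int × Int) (_ : Int) :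
    List (List Int) × Int × Int × Int :=
  let y := st.2.1 + d.1
  let x := st.2.2.1 + d.2
  (pvSet2 st.1 y x st.2.2.2, y, x, st.2.2.2 + 1)

-- body of B's outer loop over i
def pvOuterB (n : Int) (st : List (List Int) × Int × Int × Int) (i : Int) :
    List (List Int) × Int × Int × Int :=
  -- directions[i % 3]: exact, i % 3 ∈ {0,1,2} so the IndexError branch never fires
  let d := (PySem.List.pyGet? pvDirsB (PySem.Int.mod i 3)).getD (0, 0)
  (PySem.List.pyRange 0 (n - i) 1).foldl (pvInnerB d) st

def solution_alt (n : Int) : List Int :=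
  let grid := (PySem.List.pyRange 0 n 1).map
    (fun _ => (PySem.List.pyRange 0 n 1).map (fun _ => (0 : Int)))
  let st := (PySem.List.pyRange 0 n 1).foldl (pvOuterB n) (grid, -1, 0, 1)
  st.1.flatten.filter (fun i => i != 0)

-- ===== PRECONDITION & SPEC =====
def Spec_solution (n : Int) (out : List Int) : Prop := out = solution_alt n
instance (n : Int) (out : List Int) : Decidable (Spec_solution n out) := by unfold Spec_solution; infer_instance

-- ===== CLAIM (what is proved, stated in full; the proofs are below) =====
def Claim_equal_solution : Prop := ∀ (n : Int), Dom_solution n → Spec_solution n (solution n)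

-- ===== LEMMAS AND PROOFS =====

-- direction of A for current value c
def pvDir (c : Int) : Int × Int := (PySem.Dict.get? pvDirsA c).getD (0, 0)

-- one spiral segment: L moves in direction d, writing a, a+1, ...
def pvSeg (d : Int × Int) : List (List Int) → Int → Int → Int → Nat → List (List Int) × Int × Int
  | g, y, x, _, 0 => (g, y, x)
  | g, y, x, a, L + 1 =>
      pvSeg d (pvSet2 g (y + d.1) (x + d.2) a) (y + d.1) (x + d.2) (a + 1) L

-- the whole spiral: m segments of decreasing lengths
def pvSpiral : List (List Int) → Int → Int → Int → Int → Nat → List (List Int) × Int × Int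
  | g, y, x, _, _, 0 => (g, y, x)
  | g, y, x, c, a, m + 1 =>
      let p := pvSeg (pvDir c) g y x a (m + 1)
      pvSpiral p.1 p.2.1 p.2.2 (PySem.Int.mod (c + 1) 3) (a + (m + 1)) m

-- triangular numbers
def pvT : Nat → Nat
  | 0 => 0
  | m + 1 => (m + 1) + pvT m

-- the list [a, a+1, ..., a+L-1]
def pvNums (a : Int) (L : Nat) : List Int := (List.range L).map (fun (j : Nat) => a + (j : Int))

theorem pvNums_succ (a : Int) (L : Nat) : pvNums a (L + 1) = a :: pvNums (a + 1) L := by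
  rw [pvNums, List.range_succ_eq_map, List.map_cons, List.map_map, pvNums]
  congr 1
  · simp
  · apply List.map_congr_left
    intro j _
    simp only [Function.comp_apply]
    push_cast
    ring

theorem pvNums_snoc (a : Int) (L : Nat) : pvNums a (L + 1) = pvNums a L ++ [a + L] := by
  simp [pvNums, List.range_succ]

theorem pvNums_append (a : Int) (L1 L2 : Nat) :
    pvNums a (L1 + L2) = pvNums a L1 ++ pvNums (a + L1) L2 := by
  induction L2 with
  | zero => simp [pvNums]
  | succ k ih =>
      have : L1 + (k + 1) = (L1 + k) + 1 := by omega
      rw [this, pvNums_snoc, pvNums_snoc, ih, List.append_assoc]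
      push_cast
      ring_nf

theorem pvNums_sum (m : Nat) : (pvNums 1 m).sum = (pvT m : Int) := by
  induction m with
  | zero => simp [pvNums, pvT]
  | succ k ih => rw [pvNums_snoc]; simp [pvT, ih]; ring

-- A's flat loop over one segment of length L+1 (count k, size s, k + (L+1) = s + 1):
-- it performs the segment's writes and then resets the state machine.
theorem lemA_seg (L : Nat) : ∀ (g : List (List Int)) (y x a k s c : Int),
    k + (L + 1 : Nat) = s + 1 →
    (pvNums a (L + 1)).foldl pvStepA (g, y, x, k, s, c)
      = (let p := pvSeg (pvDir c) g y x a (L + 1)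
         (p.1, p.2.1, p.2.2, 0, s - 1, PySem.Int.mod (c + 1) 3)) := by
  induction L with
  | zero =>
      intro g y x a k s c h
      have hk : k = s := by push_cast at h; omega
      subst hk
      simp [pvNums, pvStepA, pvSeg, pvDir, pvSet2]
  | succ L ih =>
      intro g y x a k s c h
      have hk : k < s := by push_cast at h ⊢; omega
      rw [pvNums_succ]
      simp only [List.foldl_cons]
      have hstep : pvStepA (g, y, x, k, s, c)
          a = (pvSet2 g (y + (pvDir c).1) (x + (pvDir c).2) a,
               y + (pvDir c).1, x + (pvDir c).2, k + 1, s, c) := by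
        simp [pvStepA, pvDir, hk]
      rw [hstep]
      have h' : (k + 1) + ((L + 1 : Nat) : Int) = s + 1 := by push_cast at h ⊢; omega
      rw [ih _ _ _ _ _ _ _ h']
      simp only [pvSeg]

-- A's whole loop = pvSpiral (final count/size/current existentially quantified)
theorem lemA_outer (m : Nat) : ∀ (g : List (List Int)) (y x c a : Int),
    ∃ k s c', (pvNums a (pvT m)).foldl pvStepA (g, y, x, 0, (m : Int) - 1, c)
      = (let p := pvSpiral g y x c a m
         (p.1, p.2.1, p.2.2, k, s, c')) := by
  induction m with
  | zero =>
      intro g y x c a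
      exact ⟨0, -1, c, by simp [pvT, pvNums, pvSpiral]⟩
  | succ m ih =>
      intro g y x c a
      have hT : pvT (m + 1) = (m + 1) + pvT m := rfl
      rw [hT, pvNums_append, List.foldl_append]
      have h0 : (0 : Int) + ((m + 1 : Nat) : Int) = ((m : Int) + 1 - 1) + 1 := by push_cast; ring
      have hseg := lemA_seg m g y x a 0 ((m : Int) + 1 - 1) c h0
      have hcast : ((m + 1 : Nat) : Int) - 1 = (m : Int) + 1 - 1 := by push_cast; ring
      rw [hcast, hseg]
      simp only []
      obtain ⟨k, s, c', hrec⟩ := ih (pvSeg (pvDir c) g y x a (m + 1)).1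
        (pvSeg (pvDir c) g y x a (m + 1)).2.1 (pvSeg (pvDir c) g y x a (m + 1)).2.2
        (PySem.Int.mod (c + 1) 3) (a + ((m + 1 : Nat) : Int))
      refine ⟨k, s, c', ?_⟩
      have hsz : (m : Int) + 1 - 1 - 1 = (m : Int) - 1 := by ring
      rw [hsz, hrec]
      simp only [pvSpiral]
      push_cast
      ring_nf

-- B's inner loop depends only on the LENGTH of the iterated list
theorem lemB_inner (d : Int × Int) (l : List Int) : ∀ (g : List (List Int)) (y x num : Int),
    l.foldl (pvInnerB d) (g, y, x, num)
      = (let p := pvSeg d g y x num l.length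
         (p.1, p.2.1, p.2.2, num + l.length)) := by
  induction l with
  | nil => intro g y x num; simp [pvSeg]
  | cons hd tl ih =>
      intro g y x num
      simp only [List.foldl_cons, pvInnerB, List.length_cons]
      rw [ih]
      simp only [pvSeg]
      push_cast; ring_nf

theorem pvMod3_cases (i : Int) :
    PySem.Int.mod i 3 = 0 ∨ PySem.Int.mod i 3 = 1 ∨ PySem.Int.mod i 3 = 2 := by
  have h1 := PySem.Int.mod_nonneg i (b := 3) (by norm_num)
  have h2 := PySem.Int.mod_lt i (b := 3) (by norm_num)
  omega

theorem pvDirB_eq (i : Int) :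
    (PySem.List.pyGet? pvDirsB (PySem.Int.mod i 3)).getD (0, 0) = pvDir (PySem.Int.mod i 3) := by
  rcases pvMod3_cases i with h | h | h <;> rw [h] <;> decide

theorem pvMod3_succ (i : Int) :
    PySem.Int.mod (PySem.Int.mod i 3 + 1) 3 = PySem.Int.mod (i + 1) 3 := by
  simp only [PySem.Int.mod_eq_emod_of_pos (show (0:Int) < 3 by norm_num)]
  omega

-- B's outer loop from i0 to n = i0 + m is pvSpiral with current i0 % 3
theorem lemB_outer (m : Nat) : ∀ (i0 : Int) (g : List (List Int)) (y x num : Int),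
    (PySem.List.pyRange i0 (i0 + (m : Int)) 1).foldl (pvOuterB (i0 + (m : Int))) (g, y, x, num)
      = (let p := pvSpiral g y x (PySem.Int.mod i0 3) num m
         (p.1, p.2.1, p.2.2, num + (pvT m : Int))) := by
  induction m with
  | zero =>
      intro i0 g y x num
      rw [PySem.List.pyRange_one_eq_nil (by omega)]
      simp [pvSpiral, pvT]
  | succ m ih =>
      intro i0 g y x num
      rw [PySem.List.pyRange_one_cons (by push_cast; omega)]
      simp only [List.foldl_cons]
      have hout : pvOuterB (i0 + ((m + 1 : Nat) : Int)) (g, y, x, num) i0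
          = (let p := pvSeg (pvDir (PySem.Int.mod i0 3)) g y x num (m + 1)
             (p.1, p.2.1, p.2.2, num + ((m + 1 : Nat) : Int))) := by
        simp only [pvOuterB, pvDirB_eq]
        have hlen : i0 + ((m + 1 : Nat) : Int) - i0 = ((m + 1 : Nat) : Int) := by ring
        rw [hlen, lemB_inner]
        simp [PySem.List.length_pyRange_one]
      rw [hout]
      have harg : i0 + ((m + 1 : Nat) : Int) = (i0 + 1) + (m : Int) := by push_cast; ring
      simp only []
      rw [harg, ih (i0 + 1)]
      simp only [pvSpiral, pvMod3_succ, pvT]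
      push_cast; ring_nf

-- the two ports agree
theorem solution_eq_alt (n : Int) : solution n = solution_alt n := by
  by_cases hn : n ≤ 0
  · -- both loops are empty; the (empty) grids coincide
    simp only [solution, solution_alt]
    have h1 : PySem.List.pyRange 1 (n + 1) 1 = [] :=
      PySem.List.pyRange_one_eq_nil (by omega)
    have h2 : PySem.List.pyRange 0 n 1 = [] :=
      PySem.List.pyRange_one_eq_nil (by omega)
    rw [h1, h2]
    simp
  · push Not at hn
    obtain ⟨m, hm⟩ : ∃ m : Nat, n = (m : Int) := ⟨n.toNat, by omega⟩
    subst hm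
    simp only [solution, solution_alt]
    set g0 := (PySem.List.pyRange 0 (m : Int) 1).map
      (fun _ => (PySem.List.pyRange 0 (m : Int) 1).map (fun _ => (0 : Int))) with hg0
    -- max_number = T m
    have hmax : ((PySem.List.pyRange 1 ((m : Int) + 1) 1).map (fun i => i)).sum = (pvT m : Int) := by
      rw [List.map_id', PySem.List.pyRange_one]
      have : ((m : Int) + 1 - 1).toNat = m := by omega
      rw [this, ← pvNums, pvNums_sum]
    rw [hmax]
    -- A's number list is pvNums 1 (pvT m)
    have hlist : PySem.List.pyRange 1 ((pvT m : Int) + 1) 1 = pvNums 1 (pvT m) := by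
      rw [PySem.List.pyRange_one]
      have : ((pvT m : Int) + 1 - 1).toNat = pvT m := by omega
      rw [this]
      rfl
    rw [hlist]
    obtain ⟨k, s, c', hA⟩ := lemA_outer m g0 (-1) 0 0 1
    rw [hA]
    have hB0 : (m : Int) = 0 + (m : Int) := by ring
    have hB : (PySem.List.pyRange 0 (0 + (m : Int)) 1).foldl (pvOuterB (0 + (m : Int)))
        (g0, -1, 0, 1)
        = (let p := pvSpiral g0 (-1) 0 (PySem.Int.mod 0 3) 1 m
           (p.1, p.2.1, p.2.2, 1 + (pvT m : Int))) := lemB_outer m 0 g0 (-1) 0 1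
    rw [hB0, hB]
    have hmod0 : PySem.Int.mod 0 3 = 0 := by decide
    rw [hmod0]

-- ===== VERDICT (by name: the statement is the Claim_ definition above) =====
theorem solution_spec : Claim_equal_solution := by
  intro n _
  unfold Spec_solution
  exact solution_eq_alt n
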